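-- pv_equiv track=rewrite | github.com/muhammadnamvar/Adv_Python_Jadi | AdvPy_S1_E6.py | lang_detector
-- ===== SOURCE A (Python) =====
-- dict_en = {}
--
-- dict_fr = {}
--
-- dict_gr = {}
--
-- def lang_detector(sentence, dict_en, dict_fr, dict_gr):
--     for word in sentence.split():
--         if word in dict_en:
--             return 0
--         elif word in dict_fr:
--             return 1
--         elif word in dict_gr:
--             return 2
-- ===== SOURCE B (Python) =====
-- def lang_detector(sentence, dict_en, dict_fr, dict_gr):
--     # Different algorithm: instead of walking the sentence and probing the three
--     # dicts per word, run three independent scans that each compute the index of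
--     # the FIRST sentence word present in that dict (len(words) if none), then
--     # take the lexicographic minimum of (index, code). Ties on the index resolve
--     # to the smaller code, reproducing A's en > fr > gr elif priority.
--     words = sentence.split()
--     n = len(words)
--
--     def first_hit(d):
--         return next((i for i, w in enumerate(words) if w in d), n)
--
--     idx, code = min((first_hit(dict_en), 0), (first_hit(dict_fr), 1), (first_hit(dict_gr), 2))
--     if idx < n:
--         return code
-- ===== Notes on version B (the rewrite author's own statement) =====
-- stated objective: alternative
-- what changed: B replaces A's single walk over the words with three per-word membership tests by three independent scans that each compute the index of the first word present in that dict, then picks the lexicographic minimum of (index, code), ties going to the smaller code to reproduce the elif priority.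
import Mathlib
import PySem

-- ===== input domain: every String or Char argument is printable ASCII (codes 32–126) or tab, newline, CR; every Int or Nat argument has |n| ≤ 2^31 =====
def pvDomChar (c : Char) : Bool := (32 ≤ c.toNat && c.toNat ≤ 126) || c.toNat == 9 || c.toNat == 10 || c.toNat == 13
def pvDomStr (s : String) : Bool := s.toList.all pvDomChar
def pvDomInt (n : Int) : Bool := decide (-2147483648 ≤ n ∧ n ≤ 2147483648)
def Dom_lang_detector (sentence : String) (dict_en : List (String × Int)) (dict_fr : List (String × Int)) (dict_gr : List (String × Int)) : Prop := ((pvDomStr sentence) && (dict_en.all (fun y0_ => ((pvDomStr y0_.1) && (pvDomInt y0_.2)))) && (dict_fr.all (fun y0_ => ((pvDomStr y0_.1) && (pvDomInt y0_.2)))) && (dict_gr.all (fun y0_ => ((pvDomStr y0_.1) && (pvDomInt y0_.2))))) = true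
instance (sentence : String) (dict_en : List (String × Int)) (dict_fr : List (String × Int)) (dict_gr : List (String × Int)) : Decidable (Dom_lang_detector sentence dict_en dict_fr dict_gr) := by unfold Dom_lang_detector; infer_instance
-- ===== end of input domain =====

-- B computes, per dict, the index of the first sentence word it contains, then takes
-- the lexicographic minimum of (index, code); same return value as A, proved below.

-- ===== PORT A =====
-- A: for each word of sentence.split(), test membership in en, then fr, then gr.
def langLoopA (words : List String) (dict_en dict_fr dict_gr : List (String × Int)) : Option Int :=
  match words with
  | [] => none
  | w :: ws =>
    if dict_en.any (fun p => p.1 == w) then some 0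
    else if dict_fr.any (fun p => p.1 == w) then some 1
    else if dict_gr.any (fun p => p.1 == w) then some 2
    else langLoopA ws dict_en dict_fr dict_gr

def lang_detector (sentence : String) (dict_en : List (String × Int)) (dict_fr : List (String × Int)) (dict_gr : List (String × Int)) : Option Int :=
  langLoopA (PySem.Str.split₀ sentence) dict_en dict_fr dict_gr

-- ===== PORT B =====
-- B's first_hit: index of the first word present in d, words.length if none.
def firstHit (words : List String) (d : List (String × Int)) : Nat :=
  match words with
  | [] => 0
  | w :: ws => if d.any (fun p => p.1 == w) then 0 else firstHit ws d + 1

-- Python's min on pairs: keep the left argument on exact ties (lexicographic order).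
def minHit (a b : Nat × Int) : Nat × Int :=
  if b.1 < a.1 ∨ (b.1 = a.1 ∧ b.2 < a.2) then b else a

def lang_detector_alt (sentence : String) (dict_en : List (String × Int)) (dict_fr : List (String × Int)) (dict_gr : List (String × Int)) : Option Int :=
  let words := PySem.Str.split₀ sentence
  let n := words.length
  let best := minHit (minHit (firstHit words dict_en, 0) (firstHit words dict_fr, 1)) (firstHit words dict_gr, 2)
  if best.1 < n then some best.2 else none

-- ===== PRECONDITION & SPEC =====
def Spec_lang_detector (sentence : String) (dict_en : List (String × Int)) (dict_fr : List (String × Int)) (dict_gr : List (String × Int)) (out : Option Int) : Prop := out = lang_detector_alt sentence dict_en dict_fr dict_gr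
instance (sentence : String) (dict_en : List (String × Int)) (dict_fr : List (String × Int)) (dict_gr : List (String × Int)) (out : Option Int) : Decidable (Spec_lang_detector sentence dict_en dict_fr dict_gr out) := by unfold Spec_lang_detector; infer_instance

-- ===== CLAIM (what is proved, stated in full; the proofs are below) =====
def Claim_equal_lang_detector : Prop := ∀ (sentence : String) (dict_en : List (String × Int)) (dict_fr : List (String × Int)) (dict_gr : List (String × Int)), Dom_lang_detector sentence dict_en dict_fr dict_gr → Spec_lang_detector sentence dict_en dict_fr dict_gr (lang_detector sentence dict_en dict_fr dict_gr)

-- ===== LEMMAS AND PROOFS =====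

theorem minHit_succ (a b : Nat) (x y : Int) :
    minHit (a + 1, x) (b + 1, y) = ((minHit (a, x) (b, y)).1 + 1, (minHit (a, x) (b, y)).2) := by
  simp only [minHit]
  split_ifs <;> simp_all

theorem loops_eq (words : List String) (dict_en dict_fr dict_gr : List (String × Int)) :
    langLoopA words dict_en dict_fr dict_gr
      = (if (minHit (minHit (firstHit words dict_en, 0) (firstHit words dict_fr, 1)) (firstHit words dict_gr, 2)).1 < words.length
         then some (minHit (minHit (firstHit words dict_en, 0) (firstHit words dict_fr, 1)) (firstHit words dict_gr, 2)).2
         else none) := by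
  induction words with
  | nil => simp [langLoopA, firstHit, minHit]
  | cons w ws ih =>
    simp only [langLoopA, firstHit, List.length_cons]
    by_cases h0 : dict_en.any (fun p => p.1 == w)
    · simp [h0, minHit]
    · by_cases h1 : dict_fr.any (fun p => p.1 == w)
      · simp only [h0, h1, if_true, if_false, Bool.false_eq_true]
        simp only [minHit]
        split_ifs <;> simp_all
      · by_cases h2 : dict_gr.any (fun p => p.1 == w)
        · simp only [h0, h1, h2, if_true, if_false, Bool.false_eq_true]
          simp only [minHit]
          split_ifs <;> simp_all
        · simp only [h0, h1, h2, Bool.false_eq_true, if_false, ih, minHit_succ]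
          by_cases hlt : (minHit (minHit (firstHit ws dict_en, 0) (firstHit ws dict_fr, 1)) (firstHit ws dict_gr, 2)).1 < ws.length
          · simp [hlt]
          · simp [hlt]

-- ===== VERDICT (by name: the statement is the Claim_ definition above) =====
theorem lang_detector_spec : Claim_equal_lang_detector := by
  intro sentence dict_en dict_fr dict_gr _
  unfold Spec_lang_detector lang_detector lang_detector_alt
  exact loops_eq _ _ _ _
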